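-- pv_equiv track=rewrite | github.com/wyooyw/PolyCIM | polycim/passes/multi_level_tiling.py | combine_tilesize_by_symmetry_info
-- ===== SOURCE A (Python) =====
-- import itertools
--
-- def combine_tilesize_by_symmetry_info(dim_factors, symmetry_info):
--     """
--     symmetry_info: 2d tuple of integers
--      ((1, 3), (2, 4))
--     """
--     # check symmetry_info is a box
--     assert type(symmetry_info) == tuple
--     assert all(type(group) == tuple for group in symmetry_info)
--     assert all(type(dim) == int for group in symmetry_info for dim in group)
--
--     assert len(symmetry_info) >= 2
--     assert all(len(symmetry_info[i]) == len(symmetry_info[0]) for i in range(len(symmetry_info[0])))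
--
--
--     # get symmetry dim and non-symmetry dim
--     n_dims = len(dim_factors)
--     symmetry_dims = [symmetry_info[i][j] for i in range(len(symmetry_info)) for j in range(len(symmetry_info[i]))]
--     non_symmetry_dims = [i for i in range(n_dims) if i not in symmetry_dims]
--     assert len(symmetry_dims)==len(set(symmetry_dims))
--     assert len(symmetry_dims) + len(non_symmetry_dims) == n_dims
--
--     # dim_group_product_factors: product of the tile size of dims in one group
--     # for example: dim 0 and dim 1 are in the same group,
--     #   dim 0 has 3 tile size selections,
--     #   dim 1 has 2 tile size selections,
--     #   then the product of the tile size of dims in this group is 3*2=6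
--     # use index to represet the tile size
--     dim_indices = symmetry_info[0]
--     dim_group_factors = []
--     for dim_index in dim_indices:
--         dim_group_factors.append(list(range(len(dim_factors[dim_index]))))
--     dim_group_product_factors = list(itertools.product(*dim_group_factors))
--     n_tilesize_per_group = len(dim_group_product_factors)
--
--     n_groups = len(symmetry_info)
--     # assert n_groups==2
--
--     # symmetry tile_size_combinations: combination of tile size of symmetry indices.
--     # - element in tile_size_combinations: different tile size strategy
--     # - each strategy is a 2d tuple, same shape as symmetry_info
--     # - each element in the tuple is an integer, which is the index of the tile size in the dim_factors
--     symmetry_tile_size_combinations = []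
--     def nested_for(depth, depth_end, begin, end, indices):
--         if depth == depth_end:
--             tile_size_combination = []
--             for i in indices:
--                 tile_size_combination.extend(dim_group_product_factors[i])
--             symmetry_tile_size_combinations.append(tuple(tile_size_combination))
--             return
--         for i in range(begin, end):
--             nested_for(depth+1, depth_end, i, end, [*indices, i])
--     nested_for(0, n_groups, 0, n_tilesize_per_group, [])
--     # for tile_size_combination_index_0 in range(0, n_tilesize_per_group):
--     #     for tile_size_combination_index_1 in range(tile_size_combination_index_0, n_tilesize_per_group):
--     #         tile_size_combination = (*dim_group_product_factors[tile_size_combination_index_0], *dim_group_product_factors[tile_size_combination_index_1])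
--     #         symmetry_tile_size_combinations.append(tile_size_combination)
--
--     # get non-symmetry tile size combinations
--     non_symmetry_dim_factor_indices = [list(range(len(dim_factors[i]))) for i in non_symmetry_dims]
--     non_symmetry_tile_size_combinations = list(itertools.product(*non_symmetry_dim_factor_indices))
--
--     # combine symmetry and non-symmetry tile size combinations
--     tile_size_combinations = []
--     tile_idx_combinations = list(itertools.product(symmetry_tile_size_combinations, non_symmetry_tile_size_combinations))
--     for symmetry_tile_size_combination, non_symmetry_tile_size_combination in tile_idx_combinations:
--         tile_size_combination = dict()
--         assert len(symmetry_dims) == len(symmetry_tile_size_combination)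
--         for dim, tile_size_idx in zip(symmetry_dims, symmetry_tile_size_combination):
--             tile_size = dim_factors[dim][tile_size_idx]
--             tile_size_combination[dim] = tile_size
--         for dim, tile_size_idx in zip(non_symmetry_dims, non_symmetry_tile_size_combination):
--             tile_size = dim_factors[dim][tile_size_idx]
--             tile_size_combination[dim] = tile_size
--         tile_size_combination = tuple(tile_size_combination[i] for i in range(n_dims))
--         tile_size_combinations.append(tile_size_combination)
--     assert len(tile_size_combinations)==len(set(tile_size_combinations))
--
--     # check
--     all_combinations = list(itertools.product(*dim_factors))
--     assert set(tile_size_combinations).issubset(set(all_combinations))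
--
--     return tile_size_combinations
-- ===== SOURCE B (Python) =====
-- import itertools
--
-- def combine_tilesize_by_symmetry_info(dim_factors, symmetry_info):
--     # validate shape: symmetry_info is a rectangular box of distinct in-range dims,
--     # and corresponding dims of all groups have factor rows of equal length
--     n_groups = len(symmetry_info)
--     assert n_groups >= 2
--     width = len(symmetry_info[0])
--     assert all(len(group) == width for group in symmetry_info)
--     sym_dims = [d for group in symmetry_info for d in group]
--     assert len(set(sym_dims)) == len(sym_dims)
--     n_dims = len(dim_factors)
--     assert all(0 <= d < n_dims for d in sym_dims)
--     assert all(len(dim_factors[group[j]]) == len(dim_factors[symmetry_info[0][j]])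
--                for group in symmetry_info for j in range(width))
--     sym_set = set(sym_dims)
--     non_sym_dims = [d for d in range(n_dims) if d not in sym_set]
--
--     # per-group tile-size VALUE tuples (not indices): same lexicographic order as
--     # the index product, thanks to the aligned row lengths
--     group_vals = [list(itertools.product(*(dim_factors[d] for d in group)))
--                   for group in symmetry_info]
--     n_tilesize_per_group = len(group_vals[0])
--
--     # symmetry part: non-decreasing index tuples, one per group, lexicographic
--     sym_value_combos = []
--     for idxs in itertools.combinations_with_replacement(range(n_tilesize_per_group), n_groups):
--         block = []
--         for vals, i in zip(group_vals, idxs):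
--             block.extend(vals[i])
--         sym_value_combos.append(block)
--
--     non_sym_value_combos = list(itertools.product(*(dim_factors[d] for d in non_sym_dims)))
--
--     results = []
--     for sym_vals in sym_value_combos:
--         for non_sym_vals in non_sym_value_combos:
--             chosen = dict()
--             for dim, v in zip(sym_dims, sym_vals):
--                 chosen[dim] = v
--             for dim, v in zip(non_sym_dims, non_sym_vals):
--                 chosen[dim] = v
--             results.append(tuple(chosen[i] for i in range(n_dims)))
--     return results
-- ===== Notes on version B (the rewrite author's own statement) =====
-- stated objective: idiomatic
-- what changed: The hand-written nested_for recursion over a global accumulator is replaced by itertools.combinations_with_replacement over group indices, and the index-product-plus-late-lookup pipeline is replaced by per-group products of tile-size VALUES taken directly from dim_factors, so no tile-size index survives past the enumeration step.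
-- outside the precondition, e.g. on combine_tilesize_by_symmetry_info([[1], [1, 2]], ((0,), (1,))): A returns [(1, 1)], B raises AssertionError
import Mathlib
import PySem

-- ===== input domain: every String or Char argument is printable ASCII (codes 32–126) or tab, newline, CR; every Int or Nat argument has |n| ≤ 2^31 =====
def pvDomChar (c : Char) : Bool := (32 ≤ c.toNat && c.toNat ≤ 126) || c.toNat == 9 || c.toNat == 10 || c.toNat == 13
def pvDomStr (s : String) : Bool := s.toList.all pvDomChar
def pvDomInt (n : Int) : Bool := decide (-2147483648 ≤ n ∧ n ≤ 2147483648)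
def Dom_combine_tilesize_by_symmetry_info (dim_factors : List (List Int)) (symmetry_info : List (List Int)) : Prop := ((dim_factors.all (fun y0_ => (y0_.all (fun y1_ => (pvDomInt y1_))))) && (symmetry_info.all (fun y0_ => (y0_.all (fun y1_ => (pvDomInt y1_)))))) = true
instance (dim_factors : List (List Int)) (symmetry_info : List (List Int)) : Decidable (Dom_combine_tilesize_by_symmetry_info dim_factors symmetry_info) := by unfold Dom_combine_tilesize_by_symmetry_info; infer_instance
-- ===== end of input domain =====

-- B replaces the hand-written nested_for recursion with combinations_with_replacement over
-- group indices and products tile-size VALUES per group instead of indices looked up later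
-- (objective: idiomatic). Equivalence is claimed for the RETURN value on Pre_ (where A's
-- asserts pass); A's asserts are modelled by Pre_, not by the ports.

-- shared small helpers (used by both ports and by Pre_): dim_factors[d] and dim_factors[d][i]
def pvRow (dim_factors : List (List Int)) (d : Int) : List Int :=
  PySem.List.pyGetD dim_factors d []
def pvVal (dim_factors : List (List Int)) (d i : Int) : Int :=
  PySem.List.pyGetD (pvRow dim_factors d) i 0
-- itertools.product(*ls) (lexicographic, exact)
def pyProduct (ls : List (List Int)) : List (List Int) :=
  ls.foldr (fun xs acc => xs.flatMap (fun x => acc.map (x :: ·))) [[]]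

-- ===== PORT A =====
-- nested_for: first argument is the remaining depth (depth_end - depth); same begin/end/indices state
def nestedForA (dgpf : List (List Int)) : Nat → Nat → Nat → List Nat → List (List Int)
  | 0, _, _, indices => [indices.flatMap (fun i => dgpf.getD i [])]
  | d+1, b, e, indices => (List.range' b (e - b)).flatMap (fun i => nestedForA dgpf d i e (indices ++ [i]))

def combine_tilesize_by_symmetry_info (dim_factors : List (List Int)) (symmetry_info : List (List Int)) : List (List Int) :=
  let n_dims := dim_factors.length
  let symmetry_dims : List Int := symmetry_info.flatten
  let non_symmetry_dims : List Int := (PySem.List.pyRange 0 (n_dims : Int) 1).filter (fun i => !(symmetry_dims.contains i))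
  let dim_indices := symmetry_info.headD []
  let dim_group_factors := dim_indices.map (fun d => PySem.List.pyRange 0 ((pvRow dim_factors d).length : Int) 1)
  let dim_group_product_factors := pyProduct dim_group_factors
  let n_tilesize_per_group := dim_group_product_factors.length
  let n_groups := symmetry_info.length
  let symmetry_tile_size_combinations := nestedForA dim_group_product_factors n_groups 0 n_tilesize_per_group []
  let non_symmetry_dim_factor_indices := non_symmetry_dims.map (fun d => PySem.List.pyRange 0 ((pvRow dim_factors d).length : Int) 1)
  let non_symmetry_tile_size_combinations := pyProduct non_symmetry_dim_factor_indices
  let tile_idx_combinations := symmetry_tile_size_combinations.flatMap (fun s => non_symmetry_tile_size_combinations.map (fun ns => (s, ns)))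
  tile_idx_combinations.map (fun p =>
    let d1 := (symmetry_dims.zip p.1).foldl (fun d q => d.insert q.1 (pvVal dim_factors q.1 q.2)) (PySem.Dict.empty : PySem.Dict Int Int)
    let d2 := (non_symmetry_dims.zip p.2).foldl (fun d q => d.insert q.1 (pvVal dim_factors q.1 q.2)) d1
    (PySem.List.pyRange 0 (n_dims : Int) 1).map (fun i => d2.getD i 0))

-- ===== PORT B =====
-- itertools.combinations_with_replacement(range(b, e), k) (lexicographic, exact for b = 0)
def cwrRange : Nat → Nat → Nat → List (List Nat)
  | _, _, 0 => [[]]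
  | b, e, k+1 => (List.range' b (e - b)).flatMap (fun i => (cwrRange i e k).map (i :: ·))

def combine_tilesize_by_symmetry_info_alt (dim_factors : List (List Int)) (symmetry_info : List (List Int)) : List (List Int) :=
  let n_groups := symmetry_info.length
  let sym_dims : List Int := symmetry_info.flatten
  let n_dims := dim_factors.length
  let sym_set : PySem.Set Int := PySem.Set.ofList sym_dims
  let non_sym_dims : List Int := (PySem.List.pyRange 0 (n_dims : Int) 1).filter (fun d => !(PySem.Set.contains sym_set d))
  let group_vals := symmetry_info.map (fun g => pyProduct (g.map (fun d => pvRow dim_factors d)))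
  let n_tilesize_per_group := (group_vals.headD []).length
  let sym_value_combos := (cwrRange 0 n_tilesize_per_group n_groups).map (fun idxs =>
      (group_vals.zip idxs).flatMap (fun p => p.1.getD p.2 []))
  let non_sym_value_combos := pyProduct (non_sym_dims.map (fun d => pvRow dim_factors d))
  sym_value_combos.flatMap (fun sv => non_sym_value_combos.map (fun nv =>
    let d1 := (sym_dims.zip sv).foldl (fun d q => d.insert q.1 q.2) (PySem.Dict.empty : PySem.Dict Int Int)
    let d2 := (non_sym_dims.zip nv).foldl (fun d q => d.insert q.1 q.2) d1
    (PySem.List.pyRange 0 (n_dims : Int) 1).map (fun i => d2.getD i 0)))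

-- ===== PRECONDITION & SPEC =====
-- Pre_ = inputs where the Python A returns normally: ≥ 2 groups; symmetry_info rectangular
-- (A checks only the first len(symmetry_info[0]) groups, so A can accidentally return on
-- ragged groups whose sizes line up — excluded); distinct, in-range symmetry dims (A's
-- asserts); factor rows of corresponding group positions of EQUAL length (A indexes every
-- group's rows by group 0's index ranges and can accidentally return when later groups'
-- rows are merely longer — excluded); and either duplicate-free factor rows (else A's
-- final distinctness assert fires) or an empty row that empties the whole enumeration.
def Pre_combine_tilesize_by_symmetry_info (dim_factors : List (List Int)) (symmetry_info : List (List Int)) : Prop :=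
  2 ≤ symmetry_info.length ∧
  (∀ g ∈ symmetry_info, g.length = (symmetry_info.headD []).length) ∧
  symmetry_info.flatten.Nodup ∧
  (∀ d ∈ symmetry_info.flatten, 0 ≤ d ∧ d < (dim_factors.length : Int)) ∧
  (∀ g ∈ symmetry_info, ∀ p ∈ g.zip (symmetry_info.headD []),
      (pvRow dim_factors p.1).length = (pvRow dim_factors p.2).length) ∧
  ((∀ r ∈ dim_factors, r.Nodup) ∨
   (∃ d ∈ symmetry_info.headD [], pvRow dim_factors d = []) ∨
   (∃ k ∈ List.range dim_factors.length, (k : Int) ∉ symmetry_info.flatten ∧ pvRow dim_factors (k : Int) = []))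
instance (dim_factors : List (List Int)) (symmetry_info : List (List Int)) : Decidable (Pre_combine_tilesize_by_symmetry_info dim_factors symmetry_info) := by unfold Pre_combine_tilesize_by_symmetry_info; infer_instance

def pvWitness_combine_tilesize_by_symmetry_info : List (List Int) × List (List Int) := ([[1], [2]], [[0], [1]])

def Spec_combine_tilesize_by_symmetry_info (dim_factors : List (List Int)) (symmetry_info : List (List Int)) (out : List (List Int)) : Prop := out = combine_tilesize_by_symmetry_info_alt dim_factors symmetry_info
instance (dim_factors : List (List Int)) (symmetry_info : List (List Int)) (out : List (List Int)) : Decidable (Spec_combine_tilesize_by_symmetry_info dim_factors symmetry_info out) := by unfold Spec_combine_tilesize_by_symmetry_info; infer_instance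

-- ===== CLAIM (what is proved, stated in full; the proofs are below) =====
def Claim_equal_combine_tilesize_by_symmetry_info : Prop := ∀ (dim_factors : List (List Int)) (symmetry_info : List (List Int)), Dom_combine_tilesize_by_symmetry_info dim_factors symmetry_info → Pre_combine_tilesize_by_symmetry_info dim_factors symmetry_info → Spec_combine_tilesize_by_symmetry_info dim_factors symmetry_info (combine_tilesize_by_symmetry_info dim_factors symmetry_info)

-- ===== LEMMAS AND PROOFS =====

theorem pyProduct_nil : pyProduct [] = [[]] := rfl
theorem pyProduct_cons (xs : List Int) (ls : List (List Int)) :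
  pyProduct (xs :: ls) = xs.flatMap (fun x => (pyProduct ls).map (x :: ·)) := rfl

theorem pyProduct_map_row (df : List (List Int)) (ds : List Int) :
    pyProduct (ds.map (fun d => pvRow df d)) =
    (pyProduct (ds.map (fun d => PySem.List.pyRange 0 ((pvRow df d).length : Int) 1))).map
      (fun ix => List.zipWith (fun d i => pvVal df d i) ds ix) := by
  induction ds with
  | nil => simp [pyProduct_nil]
  | cons d ds ih =>
    simp only [List.map_cons, pyProduct_cons, ih, List.map_flatMap, List.map_map]
    conv_lhs => rw [← PySem.List.map_pyGetD_pyRange_zero' (xs := pvRow df d) (d := 0)]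
    simp only [List.flatMap_map]
    rfl

theorem nestedForA_eq_cwr (dgpf : List (List Int)) :
    ∀ (k b e : Nat) (acc : List Nat),
      nestedForA dgpf k b e acc =
      (cwrRange b e k).map (fun ix => (acc ++ ix).flatMap (fun i => dgpf.getD i [])) := by
  intro k
  induction k with
  | zero => intro b e acc; simp [nestedForA, cwrRange]
  | succ k ih =>
    intro b e acc
    simp only [nestedForA, cwrRange, ih, List.map_flatMap, List.map_map]
    congr 1
    funext i
    refine List.map_congr_left (fun ix _ => ?_)
    simp

theorem mem_cwrRange : ∀ {k b e : Nat} {ix : List Nat}, ix ∈ cwrRange b e k →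
    ix.length = k ∧ ∀ i ∈ ix, i < e := by
  intro k
  induction k with
  | zero => intro b e ix h; simp [cwrRange] at h; simp [h]
  | succ k ih =>
    intro b e ix h
    simp only [cwrRange, List.mem_flatMap, List.mem_map] at h
    obtain ⟨i, hi, ix', hix', rfl⟩ := h
    have hi' : i < e := by have := List.mem_range'_1.mp hi; omega
    obtain ⟨hl, hm⟩ := ih hix'
    refine ⟨by simp [hl], fun j hj => ?_⟩
    rcases List.mem_cons.mp hj with rfl | hj'
    · exact hi'
    · exact hm _ hj'

theorem length_mem_pyProduct : ∀ {ls : List (List Int)} {x : List Int}, x ∈ pyProduct ls →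
    x.length = ls.length := by
  intro ls
  induction ls with
  | nil => intro x h; simp [pyProduct] at h; simp [h]
  | cons r ls ih =>
    intro x h
    simp only [pyProduct, List.foldr_cons, List.mem_flatMap, List.mem_map] at h
    obtain ⟨a, _, y, hy, rfl⟩ := h
    simp [ih hy]

theorem zip_zipWith (f : Int → Int → Int) :
    ∀ (l s : List Int), l.zip (List.zipWith f l s) = (l.zip s).map (fun p => (p.1, f p.1 p.2)) := by
  intro l
  induction l with
  | nil => intro s; simp
  | cons a l ih => intro s; cases s with
    | nil => simp
    | cons b s => simp [ih]

theorem getD_map_of_map_nil {α β : Type} (f : List α → List β) (hf : f [] = [])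
    (l : List (List α)) (i : Nat) : (l.map f).getD i [] = f (l.getD i []) := by
  by_cases h : i < l.length
  · simp [List.getD_eq_getElem?_getD, h]
  · simp [List.getD_eq_getElem?_getD, List.getElem?_eq_none (by simpa using le_of_not_gt h),
      List.getElem?_eq_none (l := l.map f) (by simpa using le_of_not_gt h), hf]

theorem blocks_eq (f : Int → Int → Int) (dgpf : List (List Int)) (w : Nat)
    (hd : ∀ x ∈ dgpf, x.length = w) :
    ∀ (groups : List (List Int)) (idxs : List Nat),
      idxs.length = groups.length → (∀ g ∈ groups, g.length = w) → (∀ i ∈ idxs, i < dgpf.length) →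
      ((groups.map (fun g => dgpf.map (fun pat => List.zipWith f g pat))).zip idxs).flatMap
          (fun p => p.1.getD p.2 []) =
        List.zipWith f groups.flatten (idxs.flatMap (fun i => dgpf.getD i [])) := by
  intro groups
  induction groups with
  | nil =>
    intro idxs hlen _ _
    have : idxs = [] := List.eq_nil_of_length_eq_zero (by simpa using hlen)
    subst this; simp
  | cons g gs ih =>
    intro idxs hlen hg hi
    cases idxs with
    | nil => simp at hlen
    | cons i is =>
      simp only [List.map_cons, List.zip_cons_cons, List.flatMap_cons, List.flatten_cons]
      rw [getD_map_of_map_nil _ (by simp)]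
      have h1 : (dgpf.getD i []).length = w := by
        have hilt : i < dgpf.length := hi i (List.mem_cons_self ..)
        rw [List.getD_eq_getElem?_getD, List.getElem?_eq_getElem hilt]
        exact hd _ (List.getElem_mem hilt)
      have h2 : g.length = (dgpf.getD i []).length := by
        rw [h1]; exact hg g (List.mem_cons_self ..)
      rw [List.zipWith_append (h := h2)]
      rw [ih is (by simpa using hlen) (fun g' hg' => hg g' (List.mem_cons_of_mem _ hg'))
          (fun j hj => hi j (List.mem_cons_of_mem _ hj))]

theorem set_contains_ofList (l : List Int) (x : Int) :
    PySem.Set.contains (PySem.Set.ofList l) x = l.contains x := by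
  by_cases h : x ∈ l
  · simp only [List.contains_iff_mem.mpr h]
    exact (PySem.Set.contains_iff _ _).mpr ((PySem.Set.mem_ofList _ _).mpr h)
  · have : ¬ PySem.Set.contains (PySem.Set.ofList l) x = true := fun hc =>
      h ((PySem.Set.mem_ofList _ _).mp ((PySem.Set.contains_iff _ _).mp hc))
    simp at this
    simp [this]

theorem pv_main : ∀ (df si : List (List Int)),
    Pre_combine_tilesize_by_symmetry_info df si →
    combine_tilesize_by_symmetry_info df si = combine_tilesize_by_symmetry_info_alt df si := by
  intro df si hpre
  obtain ⟨h2, hrect, _, _, halign, _⟩ := hpre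
  cases si with
  | nil => simp at h2
  | cons g0 rest =>
  simp only [combine_tilesize_by_symmetry_info, combine_tilesize_by_symmetry_info_alt,
    List.headD_cons]
  have hw : ∀ g ∈ g0 :: rest, g.length = g0.length := by simpa using hrect
  have hrgs : ∀ g ∈ g0 :: rest,
      g.map (fun d => PySem.List.pyRange 0 ((pvRow df d).length : Int) 1)
        = g0.map (fun d => PySem.List.pyRange 0 ((pvRow df d).length : Int) 1) := by
    intro g hg
    apply List.ext_getElem (by simp [hw g hg])
    intro j hj1 hj2
    simp only [List.getElem_map]
    have hp : (g[j]'(by simpa using hj1), g0[j]'(by simpa using hj2)) ∈ g.zip g0 := by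
      rw [List.mem_iff_getElem]
      refine ⟨j, ?_, by rw [List.getElem_zip]⟩
      simp only [List.length_zip]
      simp only [List.length_map] at hj1 hj2
      omega
    have := halign g hg (g[j]'(by simpa using hj1), g0[j]'(by simpa using hj2)) (by simpa using hp)
    rw [this]
  have hgv : (g0 :: rest).map (fun g => pyProduct (g.map (fun d => pvRow df d)))
      = (g0 :: rest).map (fun g =>
          (pyProduct (g0.map (fun d => PySem.List.pyRange 0 ((pvRow df d).length : Int) 1))).map
            (fun pat => List.zipWith (fun d i => pvVal df d i) g pat)) :=
    List.map_congr_left (fun g hg => by rw [pyProduct_map_row, hrgs g hg])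
  rw [hgv]
  rw [show (((g0 :: rest).map (fun g =>
        (pyProduct (g0.map (fun d => PySem.List.pyRange 0 ((pvRow df d).length : Int) 1))).map
          (fun pat => List.zipWith (fun d i => pvVal df d i) g pat))).headD []).length
      = (pyProduct (g0.map (fun d => PySem.List.pyRange 0 ((pvRow df d).length : Int) 1))).length
    from by simp]
  have hd : ∀ x ∈ pyProduct (g0.map (fun d => PySem.List.pyRange 0 ((pvRow df d).length : Int) 1)),
      x.length = g0.length := fun x hx => by simpa using length_mem_pyProduct hx
  have hsym : ∀ idxs ∈ cwrRange 0
      (pyProduct (g0.map (fun d => PySem.List.pyRange 0 ((pvRow df d).length : Int) 1))).length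
      (g0 :: rest).length,
      (((g0 :: rest).map (fun g =>
          (pyProduct (g0.map (fun d => PySem.List.pyRange 0 ((pvRow df d).length : Int) 1))).map
            (fun pat => List.zipWith (fun d i => pvVal df d i) g pat))).zip idxs).flatMap
          (fun p => p.1.getD p.2 []) =
        List.zipWith (fun d i => pvVal df d i) (g0 :: rest).flatten
          (idxs.flatMap (fun i =>
            (pyProduct (g0.map (fun d => PySem.List.pyRange 0 ((pvRow df d).length : Int) 1))).getD i [])) := by
    intro idxs hm
    exact blocks_eq _ _ g0.length hd (g0 :: rest) idxs (mem_cwrRange hm).1 hw (mem_cwrRange hm).2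
  rw [List.map_congr_left hsym]
  rw [nestedForA_eq_cwr]
  simp only [List.nil_append]
  rw [show (fun d => !(PySem.Set.ofList (g0 :: rest).flatten).contains d)
      = (fun i : Int => !((g0 :: rest).flatten.contains i)) from funext fun d => by
        rw [set_contains_ofList]]
  rw [pyProduct_map_row df (((PySem.List.pyRange 0 (df.length : Int) 1)).filter
      (fun i => !((g0 :: rest).flatten.contains i)))]
  simp only [List.map_flatMap, List.flatMap_map, List.map_map]
  congr 1
  funext ix
  refine List.map_congr_left (fun ns _ => ?_)
  simp only [Function.comp_apply]
  simp only [zip_zipWith, List.foldl_map]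

-- ===== VERDICT (by name: the statement is the Claim_ definition above) =====
theorem combine_tilesize_by_symmetry_info_spec : Claim_equal_combine_tilesize_by_symmetry_info := by
  intro df si _ hpre
  unfold Spec_combine_tilesize_by_symmetry_info
  exact pv_main df si hpre
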